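-- pv_equiv track=rewrite | github.com/vivan191babu/Core_map | core_fas_8.py | generate_full_axial_coords
-- ===== SOURCE A (Python) =====
-- def generate_full_axial_coords(rings):
--     result = []
--     radius = rings - 1
--     for q in range(-radius, radius + 1):
--         for r in range(-radius, radius + 1):
--             s = -q - r
--             if abs(s) <= radius:
--                 result.append((q, r))
--     result.sort(
--         key=lambda qr: (
--             abs(qr[0]) + abs(qr[1]) + abs(-qr[0] - qr[1]),
--             qr[1],
--             qr[0],
--         )
--     )
--     return result
-- ===== SOURCE B (Python) =====
-- def generate_full_axial_coords(rings):
--     # Emit hexes ring by ring, already in (distance, r, q) order: no sort needed.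
--     radius = rings - 1
--     if radius < 0:
--         return []
--     result = [(0, 0)]
--     for d in range(1, radius + 1):
--         for r in range(-d, d + 1):
--             lo = -d - min(0, r)
--             hi = d - max(0, r)
--             if abs(r) == d:
--                 result.extend((q, r) for q in range(lo, hi + 1))
--             else:
--                 result.append((lo, r))
--                 result.append((hi, r))
--     return result
-- ===== Notes on version B (the rewrite author's own statement) =====
-- stated objective: faster
-- what changed: Instead of enumerating a square of candidates, filtering, and sorting them by (distance, r, q), B emits the hexes ring by ring (distance 0, 1, ..., radius), each ring row by row in increasing r with the one or two boundary q values (or the full q-range on the |r|=d rows), so the output is produced already in sorted order and the sort disappears.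
import Mathlib
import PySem

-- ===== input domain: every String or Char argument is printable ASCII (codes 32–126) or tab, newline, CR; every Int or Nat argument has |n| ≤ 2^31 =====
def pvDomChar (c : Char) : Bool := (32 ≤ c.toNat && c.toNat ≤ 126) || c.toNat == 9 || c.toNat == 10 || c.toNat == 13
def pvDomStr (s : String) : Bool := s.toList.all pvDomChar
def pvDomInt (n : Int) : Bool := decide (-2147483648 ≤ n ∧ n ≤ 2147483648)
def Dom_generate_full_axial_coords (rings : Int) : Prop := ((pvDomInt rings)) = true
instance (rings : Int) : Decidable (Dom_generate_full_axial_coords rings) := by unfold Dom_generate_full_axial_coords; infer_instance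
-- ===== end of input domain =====

-- B emits the hexes ring by ring already in (distance, r, q) order, so the O(n log n) sort disappears.

-- ===== PORT A =====
-- the sort key 'lambda qr: (|q|+|r|+|-q-r|, r, q)'; Python tuples compare lexicographically = Lex order
def keyA (qr : Int × Int) : Int ×ₗ (Int ×ₗ Int) :=
  toLex (|qr.1| + |qr.2| + |(-qr.1 - qr.2)|, toLex (qr.2, qr.1))

def generate_full_axial_coords (rings : Int) : List (Int × Int) :=
  let radius := rings - 1
  let result : List (Int × Int) :=
    (PySem.List.pyRange (-radius) (radius + 1) 1).foldl (fun result q =>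
      (PySem.List.pyRange (-radius) (radius + 1) 1).foldl (fun result r =>
        let s := -q - r
        if |s| ≤ radius then result ++ [(q, r)] else result) result) []
  PySem.List.sorted result keyA false

-- ===== PORT B =====
def generate_full_axial_coords_alt (rings : Int) : List (Int × Int) :=
  let radius := rings - 1
  if radius < 0 then []
  else
    (PySem.List.pyRange 1 (radius + 1) 1).foldl (fun result d =>
      (PySem.List.pyRange (-d) (d + 1) 1).foldl (fun result r =>
        let lo := -d - min 0 r
        let hi := d - max 0 r
        if |r| = d then result ++ (PySem.List.pyRange lo (hi + 1) 1).map (fun q => (q, r))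
        else result ++ [(lo, r)] ++ [(hi, r)]) result) [(0, 0)]

-- ===== PRECONDITION & SPEC =====
def Spec_generate_full_axial_coords (rings : Int) (out : List (Int × Int)) : Prop := out = generate_full_axial_coords_alt rings
instance (rings : Int) (out : List (Int × Int)) : Decidable (Spec_generate_full_axial_coords rings out) := by unfold Spec_generate_full_axial_coords; infer_instance

-- ===== CLAIM (what is proved, stated in full; the proofs are below) =====
def Claim_equal_generate_full_axial_coords : Prop := ∀ (rings : Int), Dom_generate_full_axial_coords rings → Spec_generate_full_axial_coords rings (generate_full_axial_coords rings)

-- ===== LEMMAS AND PROOFS =====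

-- abbreviation for the first sort-key component
def Skey (x : Int × Int) : Int := |x.1| + |x.2| + |(-x.1 - x.2)|

-- one row of B's ring d (fixed r), as a pure list
def rowB (d r : Int) : List (Int × Int) :=
  if |r| = d then (PySem.List.pyRange (-d - min 0 r) (d - max 0 r + 1) 1).map (fun q => (q, r))
  else [(-d - min 0 r, r), (d - max 0 r, r)]

def ringB (d : Int) : List (Int × Int) := (PySem.List.pyRange (-d) (d + 1) 1).flatMap (rowB d)

def altList (radius : Int) : List (Int × Int) :=
  (0, 0) :: (PySem.List.pyRange 1 (radius + 1) 1).flatMap ringB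

-- A's unsorted enumeration as a flatMap
def UL (radius : Int) : List (Int × Int) :=
  (PySem.List.pyRange (-radius) (radius + 1) 1).flatMap (fun q =>
    ((PySem.List.pyRange (-radius) (radius + 1) 1).filter (fun r => decide (|(-q - r)| ≤ radius))).map (fun r => (q, r)))

lemma inner_rowB (d : Int) (init : List (Int × Int)) :
    (PySem.List.pyRange (-d) (d + 1) 1).foldl (fun result r =>
        let lo := -d - min 0 r
        let hi := d - max 0 r
        if |r| = d then result ++ (PySem.List.pyRange lo (hi + 1) 1).map (fun q => (q, r))
        else result ++ [(lo, r)] ++ [(hi, r)]) init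
      = init ++ ringB d := by
  unfold ringB
  rw [show (fun (result : List (Int × Int)) r =>
        let lo := -d - min 0 r
        let hi := d - max 0 r
        if |r| = d then result ++ (PySem.List.pyRange lo (hi + 1) 1).map (fun q => (q, r))
        else result ++ [(lo, r)] ++ [(hi, r)])
      = (fun result r => result ++ rowB d r) from ?_]
  · rw [PySem.List.foldl_append_eq_flatMap]
  · funext result r
    by_cases h : |r| = d <;> simp [rowB, h]

lemma alt_eq_altList (rings : Int) (h : ¬ rings - 1 < 0) :
    generate_full_axial_coords_alt rings = altList (rings - 1) := by
  unfold generate_full_axial_coords_alt altList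
  rw [if_neg h]
  rw [show (fun (result : List (Int × Int)) d =>
      (PySem.List.pyRange (-d) (d + 1) 1).foldl (fun result r =>
        let lo := -d - min 0 r
        let hi := d - max 0 r
        if |r| = d then result ++ (PySem.List.pyRange lo (hi + 1) 1).map (fun q => (q, r))
        else result ++ [(lo, r)] ++ [(hi, r)]) result)
    = (fun result d => result ++ ringB d) from funext fun result => funext fun d => inner_rowB d result]
  rw [PySem.List.foldl_append_eq_flatMap]
  rfl

lemma A_eq_sorted_UL (rings : Int) :
    generate_full_axial_coords rings = PySem.List.sorted (UL (rings - 1)) keyA false := by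
  unfold generate_full_axial_coords UL
  show PySem.List.sorted ((PySem.List.pyRange (-(rings - 1)) ((rings - 1) + 1) 1).foldl
      (fun result q =>
        (PySem.List.pyRange (-(rings - 1)) ((rings - 1) + 1) 1).foldl (fun result r =>
          let s := -q - r
          if |s| ≤ rings - 1 then result ++ [(q, r)] else result) result) []) keyA false = _
  congr 1
  rw [show (fun (result : List (Int × Int)) q =>
        (PySem.List.pyRange (-(rings - 1)) ((rings - 1) + 1) 1).foldl (fun result r =>
          let s := -q - r
          if |s| ≤ rings - 1 then result ++ [(q, r)] else result) result)
    = (fun result q => result ++ ((PySem.List.pyRange (-(rings - 1)) ((rings - 1) + 1) 1).filter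
        (fun r => decide (|(-q - r)| ≤ rings - 1))).map (fun r => (q, r))) from ?_]
  · rw [PySem.List.foldl_append_eq_flatMap]; rfl
  · funext result q
    exact PySem.List.foldl_append_ite (fun r => |(-q - r)| ≤ rings - 1) (fun r => (q, r)) _ result

lemma pairwise_flatMap' {α β : Type} {R : β → β → Prop} {l : List α} {f : α → List β}
    (h1 : ∀ a ∈ l, (f a).Pairwise R)
    (h2 : l.Pairwise (fun a b => ∀ x ∈ f a, ∀ y ∈ f b, R x y)) :
    (l.flatMap f).Pairwise R := by
  rw [List.flatMap_def, List.pairwise_flatten]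
  constructor
  · intro l' hl'; rcases List.mem_map.mp hl' with ⟨a, ha, rfl⟩; exact h1 a ha
  · exact List.pairwise_map.mpr h2

lemma keylt_iff (x y : Int × Int) :
    keyA x < keyA y ↔ Skey x < Skey y ∨ (Skey x = Skey y ∧ (x.2 < y.2 ∨ (x.2 = y.2 ∧ x.1 < y.1))) := by
  simp [keyA, Skey, Prod.Lex.toLex_lt_toLex]

lemma mem_rowB {d r : Int} (hd : 1 ≤ d) (hr1 : -d ≤ r) (hr2 : r ≤ d) (x : Int × Int) :
    x ∈ rowB d r ↔ x.2 = r ∧ |x.1| ≤ d ∧ |x.1 + r| ≤ d ∧ (|x.1| = d ∨ |r| = d ∨ |x.1 + r| = d) := by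
  obtain ⟨a, b⟩ := x
  unfold rowB
  by_cases h : |r| = d
  · rw [if_pos h]
    simp only [List.mem_map, PySem.List.mem_pyRange_one, Prod.mk.injEq]
    constructor
    · rintro ⟨q, hq, rfl, rfl⟩
      simp only [Int.abs_eq_natAbs, true_and] at h ⊢
      omega
    · rintro ⟨rfl, h2, h3, _⟩
      refine ⟨a, ?_, rfl, rfl⟩
      simp only [Int.abs_eq_natAbs] at h h2 h3 ⊢
      omega
  · rw [if_neg h]
    simp only [List.mem_cons, List.not_mem_nil, or_false, Prod.mk.injEq]
    constructor
    · rintro (⟨rfl, rfl⟩ | ⟨rfl, rfl⟩) <;>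
        (simp only [Int.abs_eq_natAbs, true_and] at h ⊢; omega)
    · rintro ⟨rfl, h2, h3, h4⟩
      simp only [Int.abs_eq_natAbs, and_true] at h h2 h3 h4 ⊢
      omega

lemma Skey_of_mem_rowB {d r : Int} (hd : 1 ≤ d) (hr1 : -d ≤ r) (hr2 : r ≤ d) {x : Int × Int}
    (hx : x ∈ rowB d r) : Skey x = 2 * d ∧ x.2 = r := by
  obtain ⟨h2, h3, h4, h5⟩ := (mem_rowB hd hr1 hr2 x).mp hx
  subst h2
  unfold Skey
  simp only [Int.abs_eq_natAbs, and_true] at *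
  omega

lemma pairwise_rowB {d r : Int} (hd : 1 ≤ d) (hr1 : -d ≤ r) (hr2 : r ≤ d) :
    (rowB d r).Pairwise (fun a b => keyA a < keyA b) := by
  unfold rowB
  by_cases h : |r| = d
  · rw [if_pos h, List.pairwise_map]
    have hp := List.Pairwise.and_mem.mp
      (PySem.List.pairwise_lt_pyRange_one (-d - min 0 r) (d - max 0 r + 1))
    refine hp.imp ?_
    rintro q q' ⟨hq, hq', hlt⟩
    rw [PySem.List.mem_pyRange_one] at hq hq'
    rw [keylt_iff]
    refine Or.inr ⟨?_, Or.inr ⟨rfl, hlt⟩⟩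
    unfold Skey
    simp only [Int.abs_eq_natAbs] at h ⊢
    omega
  · rw [if_neg h]
    refine List.pairwise_cons.mpr ⟨?_, List.pairwise_singleton _ _⟩
    intro y hy
    rw [List.mem_singleton] at hy
    subst hy
    rw [keylt_iff]
    refine Or.inr ⟨?_, Or.inr ⟨rfl, ?_⟩⟩
    · unfold Skey
      simp only [Int.abs_eq_natAbs] at h ⊢
      omega
    · show -d - min 0 r < d - max 0 r
      simp only [Int.abs_eq_natAbs] at h
      omega

lemma pairwise_ringB {d : Int} (hd : 1 ≤ d) :
    (ringB d).Pairwise (fun a b => keyA a < keyA b) := by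
  unfold ringB
  apply pairwise_flatMap'
  · intro r hr
    rw [PySem.List.mem_pyRange_one] at hr
    exact pairwise_rowB hd hr.1 (by omega)
  · have hp := List.Pairwise.and_mem.mp (PySem.List.pairwise_lt_pyRange_one (-d) (d + 1))
    refine hp.imp ?_
    rintro r r' ⟨hr, hr', hlt⟩
    rw [PySem.List.mem_pyRange_one] at hr hr'
    intro x hx y hy
    obtain ⟨hSx, hx2⟩ := Skey_of_mem_rowB hd hr.1 (by omega) hx
    obtain ⟨hSy, hy2⟩ := Skey_of_mem_rowB hd hr'.1 (by omega) hy
    rw [keylt_iff]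
    exact Or.inr ⟨by omega, Or.inl (by omega)⟩

lemma mem_ringB {d : Int} (hd : 1 ≤ d) (x : Int × Int) :
    x ∈ ringB d ↔ |x.1| ≤ d ∧ |x.2| ≤ d ∧ |x.1 + x.2| ≤ d ∧ (|x.1| = d ∨ |x.2| = d ∨ |x.1 + x.2| = d) := by
  unfold ringB
  rw [List.mem_flatMap]
  constructor
  · rintro ⟨r, hr, hx⟩
    rw [PySem.List.mem_pyRange_one] at hr
    obtain ⟨h2, h3, h4, h5⟩ := (mem_rowB hd hr.1 (by omega) x).mp hx
    subst h2
    simp only [Int.abs_eq_natAbs] at *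
    omega
  · rintro ⟨h1, h2, h3, h4⟩
    refine ⟨x.2, ?_, (mem_rowB hd ?_ ?_ x).mpr ⟨rfl, h1, h3, ?_⟩⟩ <;>
      [skip; skip; skip; exact h4] <;>
      (simp only [Int.abs_eq_natAbs, PySem.List.mem_pyRange_one] at *; omega)

lemma Skey_of_mem_ringB {d : Int} (hd : 1 ≤ d) {y : Int × Int}
    (hy : y ∈ ringB d) : Skey y = 2 * d := by
  obtain ⟨h1, h2, h3, h4⟩ := (mem_ringB hd y).mp hy
  unfold Skey
  simp only [Int.abs_eq_natAbs] at *
  omega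

lemma pairwise_altList (radius : Int) :
    (altList radius).Pairwise (fun a b => keyA a < keyA b) := by
  unfold altList
  refine List.pairwise_cons.mpr ⟨?_, ?_⟩
  · intro y hy
    rcases List.mem_flatMap.mp hy with ⟨d, hd, hyd⟩
    rw [PySem.List.mem_pyRange_one] at hd
    have hS := Skey_of_mem_ringB (by omega) hyd
    rw [keylt_iff]
    refine Or.inl ?_
    unfold Skey at hS ⊢
    simp only [Int.abs_eq_natAbs] at hS ⊢
    omega
  · apply pairwise_flatMap'
    · intro d hd
      rw [PySem.List.mem_pyRange_one] at hd
      exact pairwise_ringB (by omega)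
    · have hp := List.Pairwise.and_mem.mp (PySem.List.pairwise_lt_pyRange_one 1 (radius + 1))
      refine hp.imp ?_
      rintro d d' ⟨hd, hd', hlt⟩
      rw [PySem.List.mem_pyRange_one] at hd hd'
      intro x hx y hy
      have hSx := Skey_of_mem_ringB (by omega) hx
      have hSy := Skey_of_mem_ringB (by omega) hy
      rw [keylt_iff]
      exact Or.inl (by omega)

lemma mem_altList (radius : Int) (h : 0 ≤ radius) (x : Int × Int) :
    x ∈ altList radius ↔ |x.1| ≤ radius ∧ |x.2| ≤ radius ∧ |x.1 + x.2| ≤ radius := by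
  obtain ⟨a, b⟩ := x
  unfold altList
  constructor
  · intro hx
    rcases List.mem_cons.mp hx with heq | hx'
    · rw [Prod.mk.injEq] at heq
      obtain ⟨rfl, rfl⟩ := heq
      simp only [Int.abs_eq_natAbs]
      omega
    · rcases List.mem_flatMap.mp hx' with ⟨d, hd, hxd⟩
      rw [PySem.List.mem_pyRange_one] at hd
      have := (mem_ringB (by omega) (a, b)).mp hxd
      simp only [Int.abs_eq_natAbs] at *
      omega
  · intro hb
    by_cases hx0 : a = 0 ∧ b = 0
    · obtain ⟨rfl, rfl⟩ := hx0
      exact List.mem_cons_self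
    · refine List.mem_cons_of_mem _ (List.mem_flatMap.mpr
        ⟨max |a| (max |b| |a + b|), ?_, ?_⟩)
      · rw [PySem.List.mem_pyRange_one]
        simp only [Int.abs_eq_natAbs] at *
        omega
      · rw [mem_ringB (by simp only [Int.abs_eq_natAbs] at *; omega)]
        simp only [Int.abs_eq_natAbs] at *
        omega

lemma mem_UL (radius : Int) (x : Int × Int) :
    x ∈ UL radius ↔ |x.1| ≤ radius ∧ |x.2| ≤ radius ∧ |x.1 + x.2| ≤ radius := by
  obtain ⟨a, b⟩ := x
  unfold UL
  simp only [List.mem_flatMap, List.mem_map, List.mem_filter, PySem.List.mem_pyRange_one,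
    decide_eq_true_eq, Prod.mk.injEq]
  constructor
  · rintro ⟨q, hq, r, ⟨hr, habs⟩, rfl, rfl⟩
    simp only [Int.abs_eq_natAbs] at *
    omega
  · rintro ⟨h1, h2, h3⟩
    refine ⟨a, ?_, b, ⟨?_, ?_⟩, rfl, rfl⟩ <;>
      (simp only [Int.abs_eq_natAbs] at *; omega)

lemma nodup_UL (radius : Int) : (UL radius).Nodup := by
  unfold UL
  apply pairwise_flatMap'
  · intro q _
    refine List.Nodup.map ?_ (List.Nodup.filter _ (PySem.List.nodup_pyRange_one _ _))
    intro r r' h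
    exact (Prod.mk.injEq _ _ _ _ ▸ h).2
  · have hp := List.Pairwise.and_mem.mp
      (PySem.List.pairwise_lt_pyRange_one (-radius) (radius + 1))
    refine hp.imp ?_
    rintro q q' ⟨_, _, hlt⟩
    intro x hx y hy
    rcases List.mem_map.mp hx with ⟨r, _, rfl⟩
    rcases List.mem_map.mp hy with ⟨r', _, rfl⟩
    intro he
    rw [Prod.mk.injEq] at he
    omega

lemma main_eq (radius : Int) (h : 0 ≤ radius) :
    PySem.List.sorted (UL radius) keyA false = altList radius := by
  apply PySem.List.sorted_eq_of_perm_of_pairwise_lt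
  · refine (List.perm_ext_iff_of_nodup ?_ (nodup_UL radius)).mpr ?_
    · exact (pairwise_altList radius).imp (fun h' => by intro he; subst he; exact lt_irrefl _ h')
    · intro a; rw [mem_altList radius h, mem_UL]
  · exact pairwise_altList radius

-- ===== VERDICT (by name: the statement is the Claim_ definition above) =====
theorem generate_full_axial_coords_spec : Claim_equal_generate_full_axial_coords := by
  intro rings _
  unfold Spec_generate_full_axial_coords
  rw [A_eq_sorted_UL]
  by_cases h : rings - 1 < 0
  · have hUL : UL (rings - 1) = [] := by
      unfold UL
      rw [PySem.List.pyRange_one_eq_nil (by omega)]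
      rfl
    unfold generate_full_axial_coords_alt
    simp [h, hUL, PySem.List.sorted]
  · rw [alt_eq_altList rings h, main_eq _ (by omega)]
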